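-- pv_equiv track=rewrite | github.com/justinpo/141 | MPA1-3/main.py | hasSucceedingDataTypes
-- ===== SOURCE A (Python) =====
-- def hasDataType(line) -> bool:
--     if "double" in line or "int" in line or "char" in line or "float" in line or "void" in line or "return" in line:
--         return True
--     else:
--         return False
--
-- def hasSucceedingDataTypes(tokens) -> bool:
--     pos: int = 0
--     for token in tokens:
--         if hasDataType(token) and pos + 1 < len(tokens):
--             if hasDataType(tokens[pos + 1]):
--                 return True
--         pos += 1
--     return False
-- ===== SOURCE B (Python) =====
-- def hasDataType(line) -> bool:
--     if "double" in line or "int" in line or "char" in line or "float" in line or "void" in line or "return" in line: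
--         return True
--     else:
--         return False
--
-- def hasSucceedingDataTypes(tokens) -> bool:
--     mask = "".join("1" if hasDataType(t) else "0" for t in tokens)
--     return "11" in mask
-- ===== Notes on version B (the rewrite author's own statement) =====
-- stated objective: alternative
-- what changed: Reduces the problem to substring search: encodes each token as a '1'/'0' character in a mask string and returns whether "11" occurs in it, replacing A's index-tracking lookahead loop with string containment.
import Mathlib
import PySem

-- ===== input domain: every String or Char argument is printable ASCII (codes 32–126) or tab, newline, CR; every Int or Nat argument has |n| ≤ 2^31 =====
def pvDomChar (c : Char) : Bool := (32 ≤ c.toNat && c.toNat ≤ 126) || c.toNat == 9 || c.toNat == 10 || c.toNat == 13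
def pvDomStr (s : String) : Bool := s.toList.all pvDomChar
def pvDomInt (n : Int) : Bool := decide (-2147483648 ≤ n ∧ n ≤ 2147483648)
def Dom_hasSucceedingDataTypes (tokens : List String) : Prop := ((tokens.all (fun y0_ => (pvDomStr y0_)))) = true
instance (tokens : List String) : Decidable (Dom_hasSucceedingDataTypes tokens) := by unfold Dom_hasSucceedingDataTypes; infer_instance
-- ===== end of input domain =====

-- B encodes each token as a '1'/'0' character of a mask string and decides the question by
-- substring search for "11", instead of A's index-tracking lookahead loop (alternative; same cost).

-- ===== PORT A =====
def hasDataType (line : String) : Bool :=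
  if PySem.Str.isIn "double" line || PySem.Str.isIn "int" line || PySem.Str.isIn "char" line ||
     PySem.Str.isIn "float" line || PySem.Str.isIn "void" line || PySem.Str.isIn "return" line then
    true
  else
    false

-- the `for token in tokens` loop of A, with early return; pos kept as Int like Python's
def hasSucceedingLoop (tokens : List String) (rest : List String) (pos : Int) : Bool :=
  match rest with
  | [] => false
  | token :: rs =>
    if hasDataType token && decide (pos + 1 < (tokens.length : Int)) then
      if hasDataType ((PySem.List.pyGet? tokens (pos + 1)).getD "") then true
      else hasSucceedingLoop tokens rs (pos + 1)
    else hasSucceedingLoop tokens rs (pos + 1)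

def hasSucceedingDataTypes (tokens : List String) : Bool :=
  hasSucceedingLoop tokens tokens 0

-- ===== PORT B =====
def hasSucceedingDataTypes_alt (tokens : List String) : Bool :=
  let mask : String := String.ofList (tokens.map (fun t => if hasDataType t then '1' else '0'))
  PySem.Str.isIn "11" mask

-- ===== PRECONDITION & SPEC =====
def Spec_hasSucceedingDataTypes (tokens : List String) (out : Bool) : Prop := out = hasSucceedingDataTypes_alt tokens
instance (tokens : List String) (out : Bool) : Decidable (Spec_hasSucceedingDataTypes tokens out) := by unfold Spec_hasSucceedingDataTypes; infer_instance

-- ===== CLAIM (what is proved, stated in full; the proofs are below) =====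
def Claim_equal_hasSucceedingDataTypes : Prop := ∀ (tokens : List String), Dom_hasSucceedingDataTypes tokens → Spec_hasSucceedingDataTypes tokens (hasSucceedingDataTypes tokens)

-- ===== LEMMAS AND PROOFS =====

-- reference adjacency predicate: true iff some two consecutive tokens both satisfy hasDataType
def pairAny : List String → Bool
  | [] => false
  | [_] => false
  | a :: b :: rs => (hasDataType a && hasDataType b) || pairAny (b :: rs)

theorem loop_eq_pairAny (tokens : List String) :
    ∀ (n : Nat), hasSucceedingLoop tokens (tokens.drop n) (n : Int) = pairAny (tokens.drop n) := by
  intro n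
  induction hn : tokens.drop n using pairAny.induct generalizing n with
  | case1 => simp [hasSucceedingLoop, pairAny]
  | case2 a =>
    have hlen : tokens.length = n + 1 := by
      have := congrArg List.length hn
      simp at this
      omega
    simp [hasSucceedingLoop, pairAny, hlen]
  | case3 a b rs ih =>
    have hdrop : tokens.drop (n + 1) = b :: rs := by
      have : tokens.drop (n + 1) = (tokens.drop n).drop 1 := by
        rw [List.drop_drop]
      simp [this, hn]
    have hlen : n + 1 < tokens.length := by
      have := congrArg List.length hdrop
      simp at this
      omega
    have hget : PySem.List.pyGet? tokens ((n : Int) + 1) = some b := by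
      have hc : ((n : Int) + 1) = ((n + 1 : Nat) : Int) := by push_cast; ring
      rw [hc, PySem.List.pyGet?_natCast]
      have hg : tokens[n+1]? = some b := by
        rw [List.getElem?_eq_getElem (by omega)]
        have := List.getElem_drop (xs := tokens) (i := n+1) (j := 0) (h := by simp [hdrop])
        simp [hdrop] at this
        simp [this]
      simp [hg]
    have ih' := ih (n + 1) hdrop
    have hcast : (n : Int) + 1 = ((n + 1 : Nat) : Int) := by push_cast; ring
    rw [hasSucceedingLoop, pairAny]
    simp only [hget, Option.getD_some]
    rw [hcast, ih']
    by_cases ha : hasDataType a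
    · by_cases hb : hasDataType b
      · simp [ha, hb]
        omega
      · simp [ha, hb]
    · simp [ha]

-- "11" is an infix of the 0/1 mask iff some two consecutive tokens are both data types
theorem infix_mask_iff_pairAny (tokens : List String) :
    (['1', '1'] <:+: tokens.map (fun t => if hasDataType t then '1' else '0')) ↔ pairAny tokens = true := by
  induction tokens using pairAny.induct with
  | case1 =>
    simp [pairAny]
  | case2 a =>
    simp only [List.map_cons, List.map_nil, pairAny]
    constructor
    · intro h
      have := h.length_le
      simp at this
    · intro h; exact absurd h (by simp)
  | case3 a b rs ih =>
    simp only [List.map_cons] at *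
    rw [List.infix_cons_iff]
    constructor
    · rintro (hp | hi)
      · rw [List.cons_prefix_cons] at hp
        obtain ⟨h1, hp2⟩ := hp
        rw [List.cons_prefix_cons] at hp2
        obtain ⟨h2, _⟩ := hp2
        have ha : hasDataType a = true := by
          by_contra hc; simp [hc] at h1
        have hb : hasDataType b = true := by
          by_contra hc; simp [hc] at h2
        simp [pairAny, ha, hb]
      · have := ih.mp hi
        simp [pairAny, this]
    · intro h
      rw [pairAny] at h
      rcases Bool.or_eq_true_iff.mp h with hab | htail
      · obtain ⟨ha, hb⟩ := Bool.and_eq_true_iff.mp hab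
        left
        simp [ha, hb, List.cons_prefix_cons]
      · right
        exact ih.mpr htail

theorem alt_eq_pairAny (tokens : List String) :
    hasSucceedingDataTypes_alt tokens = pairAny tokens := by
  unfold hasSucceedingDataTypes_alt
  by_cases h : pairAny tokens = true
  · rw [h]
    rw [PySem.Str.isIn_iff_infix]
    simpa [String.toList_ofList] using (infix_mask_iff_pairAny tokens).mpr h
  · rw [Bool.not_eq_true] at h
    rw [h]
    rw [← Bool.not_eq_true, PySem.Str.isIn_iff_infix]
    intro hc
    have : pairAny tokens = true := (infix_mask_iff_pairAny tokens).mp (by simpa [String.toList_ofList] using hc)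
    simp [this] at h

-- ===== VERDICT (by name: the statement is the Claim_ definition above) =====
theorem hasSucceedingDataTypes_spec : Claim_equal_hasSucceedingDataTypes := by
  intro tokens _
  unfold Spec_hasSucceedingDataTypes hasSucceedingDataTypes
  rw [alt_eq_pairAny]
  have := loop_eq_pairAny tokens 0
  simpa using this
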